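-- pv_equiv track=rewrite | github.com/OhkuboSGMS/zunda_w | zunda_w/array_util.py | duplicate_last
-- ===== SOURCE A (Python) =====
-- from typing import Any, Iterator, Sequence
--
-- def duplicate_last(array: Sequence[Any], size: int) -> Iterator[Any]:
--     """
--     arrayを size個のシーケンスに拡張する．
--     arrayで列挙する要素がなくなったら，最後の要素を終わりまで返す．
--     :param array:
--     :param size:
--     :return:
--     """
--     if len(array) == 0:
--         raise IndexError(array)
--     for i in range(size):
--         if i >= len(array):
--             yield array[-1]
--             continue
--         yield array[i]
-- ===== SOURCE B (Python) =====
-- def duplicate_last(array, size):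
--     """Extend array to `size` items: single cursor walk over an iterator; the
--     cursor stops advancing when the iterator is exhausted (next default)."""
--     if len(array) == 0:
--         raise IndexError(array)
--     it = iter(array)
--     cur = next(it)
--     emitted = 0
--     while emitted < size:
--         yield cur
--         emitted += 1
--         cur = next(it, cur)
-- ===== Notes on version B (the rewrite author's own statement) =====
-- stated objective: alternative
-- what changed: Replaces A's indexed range loop with its per-iteration i>=len(array) test by a single cursor walking an iterator, where next(it, cur) keeps the cursor on the last element once the input is exhausted; no indexing and no length comparison per item.
import Mathlib
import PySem

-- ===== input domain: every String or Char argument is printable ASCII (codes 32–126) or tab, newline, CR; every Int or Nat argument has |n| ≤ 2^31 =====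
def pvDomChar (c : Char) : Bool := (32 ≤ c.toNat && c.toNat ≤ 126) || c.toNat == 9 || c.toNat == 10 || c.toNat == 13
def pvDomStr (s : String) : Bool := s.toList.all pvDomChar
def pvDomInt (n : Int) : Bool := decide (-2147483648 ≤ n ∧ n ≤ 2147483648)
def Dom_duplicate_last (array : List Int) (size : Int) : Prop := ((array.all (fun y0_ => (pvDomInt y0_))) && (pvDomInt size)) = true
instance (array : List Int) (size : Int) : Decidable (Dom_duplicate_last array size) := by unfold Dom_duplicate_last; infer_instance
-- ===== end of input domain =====

-- B replaces A's indexed range loop (with its i >= len test) by a single cursor walking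
-- the list, the cursor staying on the last element once the list is exhausted; objective: alternative.


-- ===== PORT A =====
-- for i in range(size): if i >= len(array): yield array[-1] else yield array[i]
def duplicate_last (array : List Int) (size : Int) : List Int :=
  (PySem.List.pyRange 0 size 1).foldl
    (fun acc i =>
      if i ≥ PySem.List.len array then acc ++ [PySem.List.pyGetD array (-1) 0]
      else acc ++ [PySem.List.pyGetD array i 0]) []

-- ===== PORT B =====
-- the while loop: cur is the cursor, xs the unconsumed rest of the iterator,
-- the Nat counts the remaining iterations (size - emitted); next(it, cur)
-- advances the cursor when xs is nonempty and leaves it in place otherwise.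
def dupGo (cur : Int) (xs : List Int) : Nat → List Int
  | 0 => []
  | n + 1 =>
    cur :: (match xs with
            | [] => dupGo cur [] n
            | y :: ys => dupGo y ys n)

-- cur = next(it) on a nonempty array; the empty array raises (outside Pre_)
def duplicate_last_alt (array : List Int) (size : Int) : List Int :=
  match array with
  | [] => []
  | x :: xs => dupGo x xs size.toNat

-- ===== PRECONDITION & SPEC =====
-- Pre_ excludes exactly the empty array, on which A raises IndexError(array).
def Pre_duplicate_last (array : List Int) (size : Int) : Prop := array ≠ []
instance (array : List Int) (size : Int) : Decidable (Pre_duplicate_last array size) := by unfold Pre_duplicate_last; infer_instance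
def pvWitness_duplicate_last : List Int × Int := ([3, 7], 5)
def Spec_duplicate_last (array : List Int) (size : Int) (out : List Int) : Prop := out = duplicate_last_alt array size
instance (array : List Int) (size : Int) (out : List Int) : Decidable (Spec_duplicate_last array size out) := by unfold Spec_duplicate_last; infer_instance

-- ===== CLAIM (what is proved, stated in full; the proofs are below) =====
def Claim_equal_duplicate_last : Prop := ∀ (array : List Int) (size : Int), Dom_duplicate_last array size → Pre_duplicate_last array size → Spec_duplicate_last array size (duplicate_last array size)

-- ===== LEMMAS AND PROOFS =====

-- A's loop body is acc ++ [g i], so the loop is a map over the range.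
theorem dl_loopA_eq_map (array : List Int) (size : Int) :
    duplicate_last array size =
      (PySem.List.pyRange 0 size 1).map
        (fun i => if i ≥ PySem.List.len array then PySem.List.pyGetD array (-1) 0
                  else PySem.List.pyGetD array i 0) := by
  unfold duplicate_last
  have hb : (fun (acc : List Int) (i : Int) =>
      if i ≥ PySem.List.len array then acc ++ [PySem.List.pyGetD array (-1) 0]
      else acc ++ [PySem.List.pyGetD array i 0]) =
      (fun acc i => acc ++ [if i ≥ PySem.List.len array then PySem.List.pyGetD array (-1) 0
                            else PySem.List.pyGetD array i 0]) := by
    funext acc i; split <;> rfl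
  rw [hb, PySem.List.foldl_append_singleton_eq_map, List.nil_append]

-- the mapped range, over m : Nat, is take m ++ replicate (m - len) last
theorem dl_map_range (array : List Int) (m : Nat) :
    (List.range m).map
        (fun (k : Nat) => if ((k : Int)) ≥ PySem.List.len array then PySem.List.pyGetD array (-1) 0
                  else PySem.List.pyGetD array ((k : Int)) 0) =
      array.take m ++ List.replicate (m - array.length) (PySem.List.pyGetD array (-1) 0) := by
  induction m with
  | zero => simp
  | succ m ih =>
    rw [List.range_succ, List.map_append, ih]
    by_cases h : m < array.length
    · have hlt : ¬ ((m : Int) ≥ PySem.List.len array) := by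
        simp [PySem.List.len_eq]; exact_mod_cast h
      have hget : PySem.List.pyGetD array (m : Int) 0 = array[m] :=
        PySem.List.pyGetD_ofNat array m 0 h
      simp only [List.map_singleton, hlt, hget]
      rw [Nat.sub_eq_zero_of_le h, Nat.sub_eq_zero_of_le (by omega)]
      have htake : array.take (m + 1) = array.take m ++ [array[m]] := by
        rw [List.take_add_one, List.getElem?_eq_getElem h]
        rfl
      rw [htake]
      simp
    · have hge : ((m : Int) ≥ PySem.List.len array) := by
        simp [PySem.List.len_eq]; omega
      simp only [List.map_singleton, hge, if_pos]
      rw [List.take_of_length_le (by omega), List.take_of_length_le (by omega),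
          Nat.succ_sub (by omega), List.replicate_succ', List.append_assoc]

-- closed form for A's output
theorem dl_A_closed (array : List Int) (size : Int) :
    duplicate_last array size =
      array.take size.toNat ++
        List.replicate (size.toNat - array.length) (PySem.List.pyGetD array (-1) 0) := by
  rw [dl_loopA_eq_map]
  by_cases hs : size ≤ 0
  · rw [PySem.List.pyRange_one_eq_nil hs]
    have h0 : size.toNat = 0 := by omega
    simp [h0]
  · push Not at hs
    have hm : size = ((size.toNat : Nat) : Int) := by omega
    rw [hm, PySem.List.pyRange_zero_nat, List.map_map]
    exact dl_map_range array size.toNat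

-- closed form for the cursor walk: what is emitted is the prefix then the last element
theorem dupGo_eq (n : Nat) : ∀ (cur : Int) (xs : List Int),
    dupGo cur xs n =
      (cur :: xs).take n ++ List.replicate (n - (xs.length + 1)) (xs.getLastD cur) := by
  induction n with
  | zero => intro cur xs; simp [dupGo]
  | succ n ih =>
    intro cur xs
    cases xs with
    | nil =>
      rw [show dupGo cur [] (n+1) = cur :: dupGo cur [] n from rfl, ih]
      cases n with
      | zero => simp
      | succ m => simp [List.replicate_succ]
    | cons y ys =>
      rw [show dupGo cur (y :: ys) (n+1) = cur :: dupGo y ys n from rfl, ih,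
          List.getLastD_cons, show n + 1 - ((y :: ys).length + 1) = n - (ys.length + 1) from by simp]
      rfl

theorem duplicate_last_eq (array : List Int) (size : Int) (h : array ≠ []) :
    duplicate_last array size = duplicate_last_alt array size := by
  cases array with
  | nil => exact absurd rfl h
  | cons x xs =>
    rw [dl_A_closed]
    rw [show duplicate_last_alt (x :: xs) size = dupGo x xs size.toNat from rfl, dupGo_eq]
    rw [PySem.List.pyGetD_neg_one (x :: xs) 0 h]
    rw [List.getLast_eq_getLastD]
    simp

-- ===== VERDICT (by name: the statement is the Claim_ definition above) =====
theorem duplicate_last_spec : Claim_equal_duplicate_last := by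
  intro array size _ hpre
  exact duplicate_last_eq array size hpre
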